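-- pv_equiv track=rewrite | github.com/ekirton/wily-rooster | src/Poule/auditing/engine.py | _determine_weakest
-- ===== SOURCE A (Python) =====
-- from typing import Any, Dict, List, Optional, Set
--
-- def _determine_weakest(
--     names: List[str], axiom_sets: Dict[str, Set[str]]
-- ) -> List[str]:
--     """Determine which theorems are weakest.
--
--     Strict subset inclusion is the primary criterion.
--     Cardinality is the tiebreaker.
--     """
--     # Check for strict subset relationships.
--     # A theorem is "dominated" if its axiom set is a strict superset of another's.
--     dominated: Set[str] = set()
--     for i, name_i in enumerate(names):
--         for j, name_j in enumerate(names):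
--             if i == j:
--                 continue
--             # If name_j's axioms are a strict subset of name_i's axioms,
--             # then name_i is dominated.
--             if axiom_sets[name_j] < axiom_sets[name_i]:
--                 dominated.add(name_i)
--                 break
--
--     # Non-dominated theorems
--     candidates = [n for n in names if n not in dominated]
--
--     if not candidates:
--         # All are dominated by each other (shouldn't happen with strict subset),
--         # fall back to cardinality
--         candidates = list(names)
--
--     # Among non-dominated, pick those with minimum cardinality
--     min_count = min(len(axiom_sets[n]) for n in candidates)
--     weakest = [n for n in candidates if len(axiom_sets[n]) == min_count]
--
--     return weakest
-- ===== SOURCE B (Python) =====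
-- from typing import Dict, List, Set
--
-- def _determine_weakest(
--     names: List[str], axiom_sets: Dict[str, Set[str]]
-- ) -> List[str]:
--     """Weakest theorems = names whose axiom set has globally minimum cardinality.
--
--     A strict superset always has strictly larger cardinality than its subset,
--     so a globally minimum-cardinality set is never dominated; the whole
--     subset-domination scan is therefore redundant.
--     """
--     min_count = min(len(axiom_sets[n]) for n in names)
--     return [n for n in names if len(axiom_sets[n]) == min_count]
-- ===== Notes on version B (the rewrite author's own statement) =====
-- stated objective: faster
-- what changed: B drops A's O(n^2 * s) pairwise strict-subset domination scan and the unreachable empty-candidates fallback entirely: since a strict superset has strictly larger cardinality than its subset, a name of globally minimum axiom-set cardinality is never dominated, so the result is exactly the names (in order) whose set size equals the global minimum, computed in one min pass plus one filter.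
import Mathlib
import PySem

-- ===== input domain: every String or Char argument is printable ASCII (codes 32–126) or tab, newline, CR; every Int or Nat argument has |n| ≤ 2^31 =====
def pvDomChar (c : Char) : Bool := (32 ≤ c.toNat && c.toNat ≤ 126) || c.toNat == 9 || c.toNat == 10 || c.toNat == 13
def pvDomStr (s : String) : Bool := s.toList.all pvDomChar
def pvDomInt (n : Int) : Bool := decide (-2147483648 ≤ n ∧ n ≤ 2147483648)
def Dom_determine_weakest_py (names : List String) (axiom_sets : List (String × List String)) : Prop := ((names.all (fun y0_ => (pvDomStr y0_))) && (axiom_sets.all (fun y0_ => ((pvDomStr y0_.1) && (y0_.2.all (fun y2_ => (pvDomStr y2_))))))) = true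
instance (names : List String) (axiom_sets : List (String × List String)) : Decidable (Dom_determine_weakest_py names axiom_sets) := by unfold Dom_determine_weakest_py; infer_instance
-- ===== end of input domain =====

-- B replaces A's quadratic strict-subset domination scan by a single global
-- minimum-cardinality pass (a minimum-cardinality set is never a strict superset).

-- ===== PORT A =====
-- axiom_sets[n]  (total form; Pre_ guarantees the key is present)
def pvGet (axiom_sets : List (String × List String)) (n : String) : List String :=
  PySem.Dict.getD (PySem.Dict.mk axiom_sets) n []

-- Python's  a < b  on sets: strict subset
def pvSsub (a b : List String) : Bool :=
  PySem.Set.issubset a b && !(PySem.Set.issubset b a)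

def determine_weakest_py (names : List String) (axiom_sets : List (String × List String)) : List String :=
  -- dominated: Set[str]; the inner loop with break = any over enumerate(names)
  let dominated : PySem.Set String :=
    (PySem.List.enumerate names).foldl (fun dom p =>
      if (PySem.List.enumerate names).any (fun q =>
            decide (p.1 ≠ q.1) && pvSsub (pvGet axiom_sets q.2) (pvGet axiom_sets p.2))
      then PySem.Set.add dom p.2 else dom) PySem.Set.empty
  let candidates := names.filter (fun n => !(PySem.Set.contains dominated n))
  let candidates := if candidates.isEmpty then names else candidates
  -- min(...): under Pre_ candidates is nonempty, so min? is some; the default 0 is unreachable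
  let min_count := (PySem.List.min? (candidates.map (fun n => (pvGet axiom_sets n).length)) (fun x => x)).getD 0
  candidates.filter (fun n => (pvGet axiom_sets n).length == min_count)

-- ===== PORT B =====
def determine_weakest_py_alt (names : List String) (axiom_sets : List (String × List String)) : List String :=
  let min_count := (PySem.List.min? (names.map (fun n => (pvGet axiom_sets n).length)) (fun x => x)).getD 0
  names.filter (fun n => (pvGet axiom_sets n).length == min_count)

-- ===== PRECONDITION & SPEC =====
-- A raises ValueError (min of an empty sequence) when names is empty, and KeyError when a
-- name is missing from axiom_sets; B raises identically there.  The Nodup clause is not a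
-- narrowing but the set-encoding invariant: each dict value encodes a Python set, i.e.
-- holds distinct elements.
def Pre_determine_weakest_py (names : List String) (axiom_sets : List (String × List String)) : Prop :=
  names ≠ [] ∧ (∀ n ∈ names, (PySem.Dict.get? (PySem.Dict.mk axiom_sets) n).isSome) ∧
    (∀ p ∈ axiom_sets, p.2.Nodup)
instance (names : List String) (axiom_sets : List (String × List String)) : Decidable (Pre_determine_weakest_py names axiom_sets) := by unfold Pre_determine_weakest_py; infer_instance

def pvWitness_determine_weakest_py : List String × (List (String × List String)) :=
  (["a", "b"], [("a", ["x"]), ("b", ["x", "y"])])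

def Spec_determine_weakest_py (names : List String) (axiom_sets : List (String × List String)) (out : List String) : Prop := out = determine_weakest_py_alt names axiom_sets
instance (names : List String) (axiom_sets : List (String × List String)) (out : List String) : Decidable (Spec_determine_weakest_py names axiom_sets out) := by unfold Spec_determine_weakest_py; infer_instance

-- ===== CLAIM (what is proved, stated in full; the proofs are below) =====
def Claim_equal_determine_weakest_py : Prop := ∀ (names : List String) (axiom_sets : List (String × List String)), Dom_determine_weakest_py names axiom_sets → Pre_determine_weakest_py names axiom_sets → Spec_determine_weakest_py names axiom_sets (determine_weakest_py names axiom_sets)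

-- ===== LEMMAS AND PROOFS =====

-- a value returned by the dict lookup is one of the dict's value lists
theorem get?_mk_mem (l : List (String × List String)) (n : String) (v : List String)
    (h : PySem.Dict.get? (PySem.Dict.mk l) n = some v) : ∃ p ∈ l, p.2 = v := by
  induction l with
  | nil => simp [PySem.Dict.get?] at h
  | cons p t ih =>
    rw [PySem.Dict.get?_mk_cons] at h
    split at h
    · exact ⟨p, by simp, by injection h⟩
    · obtain ⟨q, hq, hv⟩ := ih h
      exact ⟨q, by simp [hq], hv⟩

theorem pvGet_nodup (axiom_sets : List (String × List String))
    (hnd : ∀ p ∈ axiom_sets, p.2.Nodup) (n : String) : (pvGet axiom_sets n).Nodup := by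
  unfold pvGet PySem.Dict.getD
  cases h : PySem.Dict.get? (PySem.Dict.mk axiom_sets) n with
  | none => simp
  | some v =>
    obtain ⟨p, hp, hv⟩ := get?_mk_mem _ _ _ h
    simpa [hv] using hnd p hp

-- strict subset implies strictly smaller cardinality (on duplicate-free lists)
theorem pvSsub_length_lt (a b : List String) (ha : a.Nodup) (hb : b.Nodup)
    (h : pvSsub a b = true) : a.length < b.length := by
  unfold pvSsub at h
  rw [Bool.and_eq_true] at h
  obtain ⟨h1, h2⟩ := h
  rw [PySem.Set.issubset_iff] at h1
  have h2' : ¬ ∀ x ∈ b, x ∈ a := by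
    intro hc
    rw [Bool.not_eq_true', ← Bool.not_eq_true, PySem.Set.issubset_iff] at h2
    exact h2 hc
  push Not at h2'
  obtain ⟨y, hyb, hya⟩ := h2'
  have hsub : a.toFinset ⊂ b.toFinset := by
    rw [Finset.ssubset_def]
    constructor
    · intro x hx
      simp only [List.mem_toFinset] at *
      exact h1 x hx
    · intro hc
      exact hya (by simpa using hc (by simpa using hyb))
  have := Finset.card_lt_card hsub
  rwa [List.toFinset_card_of_nodup ha, List.toFinset_card_of_nodup hb] at this

-- loop invariant: everything in the dominated set has a strictly smaller set in names
theorem dominated_spec_aux (names : List String) (axiom_sets : List (String × List String))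
    (l : List (Int × String)) (dom0 : PySem.Set String)
    (h0 : ∀ x ∈ dom0, ∃ j ∈ names, pvSsub (pvGet axiom_sets j) (pvGet axiom_sets x) = true) :
    ∀ x ∈ l.foldl (fun dom p =>
      if (PySem.List.enumerate names).any (fun q =>
            decide (p.1 ≠ q.1) && pvSsub (pvGet axiom_sets q.2) (pvGet axiom_sets p.2))
      then PySem.Set.add dom p.2 else dom) dom0,
      ∃ j ∈ names, pvSsub (pvGet axiom_sets j) (pvGet axiom_sets x) = true := by
  induction l generalizing dom0 with
  | nil => exact h0
  | cons p t ih =>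
    rw [List.foldl_cons]
    apply ih
    intro x hx
    split at hx
    case isTrue hc =>
      rw [PySem.Set.mem_add] at hx
      rcases hx with hx | hx
      · exact h0 x hx
      · subst hx
        rw [List.any_eq_true] at hc
        obtain ⟨q, hq, hcq⟩ := hc
        rw [Bool.and_eq_true] at hcq
        rw [PySem.List.mem_enumerate_iff] at hq
        obtain ⟨k, hk, rfl⟩ := hq
        exact ⟨names[k], List.getElem_mem hk, hcq.2⟩
    case isFalse => exact h0 x hx

theorem dominated_spec (names : List String) (axiom_sets : List (String × List String))
    (x : String)
    (hx : x ∈ (PySem.List.enumerate names).foldl (fun dom p =>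
      if (PySem.List.enumerate names).any (fun q =>
            decide (p.1 ≠ q.1) && pvSsub (pvGet axiom_sets q.2) (pvGet axiom_sets p.2))
      then PySem.Set.add dom p.2 else dom) PySem.Set.empty) :
    ∃ j ∈ names, pvSsub (pvGet axiom_sets j) (pvGet axiom_sets x) = true :=
  dominated_spec_aux names axiom_sets _ _ (by intro y hy; simp [PySem.Set.empty] at hy) x hx

theorem determine_weakest_main (names : List String) (axiom_sets : List (String × List String))
    (hne : names ≠ []) (hnd : ∀ p ∈ axiom_sets, p.2.Nodup) :
    determine_weakest_py names axiom_sets = determine_weakest_py_alt names axiom_sets := by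
  simp only [determine_weakest_py, determine_weakest_py_alt]
  -- the global minimum cardinality m
  have hmapne : names.map (fun n => (pvGet axiom_sets n).length) ≠ [] := by
    simpa using hne
  obtain ⟨m, hm⟩ : ∃ m, PySem.List.min? (names.map (fun n => (pvGet axiom_sets n).length)) (fun x => x) = some m := by
    cases h : PySem.List.min? (names.map (fun n => (pvGet axiom_sets n).length)) (fun x => x) with
    | none => exact absurd ((PySem.List.min?_eq_none_iff _ _).mp h) hmapne
    | some m => exact ⟨m, rfl⟩
  have hm_min : ∀ n ∈ names, m ≤ (pvGet axiom_sets n).length := by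
    intro n hn
    exact PySem.List.min?_isMin hm _ (List.mem_map_of_mem hn)
  obtain ⟨a, ha, hLa⟩ : ∃ a ∈ names, (pvGet axiom_sets a).length = m := by
    have := PySem.List.min?_mem hm
    rw [List.mem_map] at this
    obtain ⟨a, ha, hLa⟩ := this
    exact ⟨a, ha, hLa⟩
  -- names of minimum cardinality are never dominated
  have hD : ∀ n ∈ names, (pvGet axiom_sets n).length = m →
      PySem.Set.contains ((PySem.List.enumerate names).foldl (fun dom p =>
        if (PySem.List.enumerate names).any (fun q =>
              decide (p.1 ≠ q.1) && pvSsub (pvGet axiom_sets q.2) (pvGet axiom_sets p.2))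
        then PySem.Set.add dom p.2 else dom) PySem.Set.empty) n = false := by
    intro n hn hLn
    by_contra hc
    rw [Bool.not_eq_false] at hc
    have hmem : n ∈ (PySem.List.enumerate names).foldl (fun dom p =>
        if (PySem.List.enumerate names).any (fun q =>
              decide (p.1 ≠ q.1) && pvSsub (pvGet axiom_sets q.2) (pvGet axiom_sets p.2))
        then PySem.Set.add dom p.2 else dom) PySem.Set.empty := by
      simpa [PySem.Set.contains] using hc
    obtain ⟨j, hj, hss⟩ := dominated_spec names axiom_sets n hmem
    have hlt := pvSsub_length_lt _ _ (pvGet_nodup _ hnd j) (pvGet_nodup _ hnd n) hss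
    have := hm_min j hj
    omega
  -- the candidate list is nonempty (a is in it), so the fallback never fires
  have hafil : a ∈ names.filter (fun n => !(PySem.Set.contains ((PySem.List.enumerate names).foldl (fun dom p =>
        if (PySem.List.enumerate names).any (fun q =>
              decide (p.1 ≠ q.1) && pvSsub (pvGet axiom_sets q.2) (pvGet axiom_sets p.2))
        then PySem.Set.add dom p.2 else dom) PySem.Set.empty) n)) := by
    rw [List.mem_filter]
    exact ⟨ha, by rw [hD a ha hLa]; rfl⟩
  rw [hm]
  set dom := (PySem.List.enumerate names).foldl (fun dom p =>
        if (PySem.List.enumerate names).any (fun q =>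
              decide (p.1 ≠ q.1) && pvSsub (pvGet axiom_sets q.2) (pvGet axiom_sets p.2))
        then PySem.Set.add dom p.2 else dom) PySem.Set.empty with hdom
  set c := names.filter (fun n => !(PySem.Set.contains dom n)) with hc
  have hcne : c.isEmpty = false := by
    rw [List.isEmpty_eq_false_iff]
    exact List.ne_nil_of_mem hafil
  rw [hcne]
  simp only [Bool.false_eq_true, if_false]
  -- the minimum over the candidates equals the global minimum
  have hmc : PySem.List.min? (c.map (fun n => (pvGet axiom_sets n).length)) (fun x => x) = some m := by
    cases h : PySem.List.min? (c.map (fun n => (pvGet axiom_sets n).length)) (fun x => x) with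
    | none =>
      rw [PySem.List.min?_eq_none_iff] at h
      rw [List.map_eq_nil_iff] at h
      exact absurd (h ▸ hafil) (List.not_mem_nil)
    | some m' =>
      have hm'_mem := PySem.List.min?_mem h
      rw [List.mem_map] at hm'_mem
      obtain ⟨cdt, hcdt, hLc⟩ := hm'_mem
      have h1 : m ≤ m' := hLc ▸ hm_min cdt (List.mem_filter.mp hcdt).1
      have h2 : m' ≤ m := hLa ▸ PySem.List.min?_isMin h _ (List.mem_map_of_mem hafil)
      rw [le_antisymm h2 h1]
  rw [hmc]
  simp only [Option.getD_some]
  rw [hc, List.filter_filter]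
  apply List.filter_congr
  intro n hn
  cases hq : ((pvGet axiom_sets n).length == m) with
  | false => simp
  | true =>
    have hlm : (pvGet axiom_sets n).length = m := by simpa using hq
    simp only [Bool.true_and]
    simp only [Bool.not_eq_eq_eq_not, Bool.not_true, hD n hn hlm]

-- ===== VERDICT (by name: the statement is the Claim_ definition above) =====
theorem determine_weakest_py_spec : Claim_equal_determine_weakest_py := by
  intro names axiom_sets _ hpre
  exact determine_weakest_main names axiom_sets hpre.1 hpre.2.2
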